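-- pv_equiv track=rewrite | github.com/AI-replica/filenames_sanitizer | utils/case_insensitive_twin_files.py | identify_twins
-- ===== SOURCE A (Python) =====
-- def identify_twins(paths, proposed_changes):
--     """
--
--     >>> paths = ['/a/h::.7z', '/a/h:.7z']
--     >>> proposed_changes = {'/a/h::.7z': '/a/h_.7z', '/a/h:.7z': '/a/h_.7z'}
--     >>> twins_families = identify_twins(paths, proposed_changes)
--     >>> twins_families
--     {'/a/h::.7z': [{'filesystem_path': '/a/h::.7z', 'proposed_path': '/a/h_.7z'}, {'filesystem_path': '/a/h:.7z', 'proposed_path': '/a/h_.7z'}]}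
--     """
--     # Build combined_paths
--     combined_paths = []
--     for path in paths:
--         combined_paths.append({
--             'filesystem_path': path,
--             'proposed_path': proposed_changes.get(path, path)
--         })
--
--     twins_families = {}
--     path_dict = {}
--
--     # Check for twins in combined_paths
--     for path_info in combined_paths:
--         lower_path = path_info['proposed_path'].lower()
--
--         if lower_path in path_dict:
--             # We found a twin
--             existing_path_info = path_dict[lower_path]
--             existing_path = existing_path_info['filesystem_path']
--             # Use the existing path's filesystem and proposed paths
--             if existing_path in twins_families:
--                 twins_families[existing_path].append(path_info)
--             else:
--                 twins_families[existing_path] = [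
--                     existing_path_info,
--                     path_info
--                 ]
--         else:
--             # Store the entire path_info, not just the filesystem_path
--             path_dict[lower_path] = path_info
--
--     return twins_families
-- ===== SOURCE B (Python) =====
-- def identify_twins(paths, proposed_changes):
--     # Group every path by the lower-cased proposed name, then keep the groups of
--     # size >= 2, keyed by the group's first filesystem path, in the order in which
--     # each group's second member appears.
--     combined = [{'filesystem_path': p,
--                  'proposed_path': proposed_changes.get(p, p)} for p in paths]
--     groups = {}
--     for info in combined:
--         groups.setdefault(info['proposed_path'].lower(), []).append(info)
--     counts = {}
--     order = []
--     for info in combined: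
--         k = info['proposed_path'].lower()
--         counts[k] = counts.get(k, 0) + 1
--         if counts[k] == 2:
--             order.append(k)
--     return {groups[k][0]['filesystem_path']: groups[k] for k in order}
-- ===== Notes on version B (the rewrite author's own statement) =====
-- stated objective: alternative
-- what changed: Replaces A's single stateful pass with first/second-occurrence branching over two dicts by a group-then-filter decomposition: one pass groups all entries by lower-cased proposed path, one pass records the order in which keys reach their second occurrence, and a final comprehension emits the multi-member groups.
import Mathlib
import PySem

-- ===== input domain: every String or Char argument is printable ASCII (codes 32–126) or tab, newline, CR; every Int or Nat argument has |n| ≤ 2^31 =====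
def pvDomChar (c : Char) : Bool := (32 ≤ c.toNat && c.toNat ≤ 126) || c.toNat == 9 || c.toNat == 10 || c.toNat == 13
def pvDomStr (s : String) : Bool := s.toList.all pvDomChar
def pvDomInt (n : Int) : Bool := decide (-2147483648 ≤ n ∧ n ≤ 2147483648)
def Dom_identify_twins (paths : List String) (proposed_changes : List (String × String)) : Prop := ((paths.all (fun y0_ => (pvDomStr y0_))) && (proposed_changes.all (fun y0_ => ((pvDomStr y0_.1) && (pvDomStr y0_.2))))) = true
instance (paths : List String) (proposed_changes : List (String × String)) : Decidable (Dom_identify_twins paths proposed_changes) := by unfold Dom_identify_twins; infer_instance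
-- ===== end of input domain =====

-- B groups paths by lower-cased proposed name and then filters the multi-member groups,
-- instead of A's single stateful pass branching on first/second occurrence; same result, same cost.

-- path_info dicts have exactly the two keys "filesystem_path" / "proposed_path"; both ports
-- build and read them through these two helpers (Python's path_info[k], always present here).
def pvMkInfo (p v : String) : List (String × String) :=
  [("filesystem_path", p), ("proposed_path", v)]
def pvInfoGet (info : List (String × String)) (k : String) : String :=
  ((PySem.Dict.mk info).get? k).getD ""

-- ===== PORT A =====
def identify_twins (paths : List String) (proposed_changes : List (String × String)) : List (String × List (List (String × String))) :=
  -- combined_paths: append one path_info per path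
  let combined : List (List (String × String)) :=
    paths.foldl (fun acc path =>
      acc ++ [pvMkInfo path (((PySem.Dict.mk proposed_changes).get? path).getD path)]) []
  -- single loop carrying (twins_families, path_dict)
  let st :=
    combined.foldl (fun (st : PySem.Dict String (List (List (String × String))) × PySem.Dict String (List (String × String))) path_info =>
      let lower_path := PySem.Str.lower (pvInfoGet path_info "proposed_path")
      match st.2.get? lower_path with
      | some existing_path_info =>
          let existing_path := pvInfoGet existing_path_info "filesystem_path"
          if st.1.contains existing_path then
            (st.1.modify existing_path [] (fun fam => fam ++ [path_info]), st.2)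
          else
            (st.1.insert existing_path [existing_path_info, path_info], st.2)
      | none => (st.1, st.2.insert lower_path path_info))
      (PySem.Dict.empty, PySem.Dict.empty)
  st.1.items

-- ===== PORT B =====
def identify_twins_alt (paths : List String) (proposed_changes : List (String × String)) : List (String × List (List (String × String))) :=
  let combined : List (List (String × String)) :=
    paths.map (fun p => pvMkInfo p (((PySem.Dict.mk proposed_changes).get? p).getD p))
  -- groups.setdefault(k, []).append(info)  ==  groups[k] = groups.get(k, []) + [info]
  let groups : PySem.Dict String (List (List (String × String))) :=
    combined.foldl (fun g info =>
      g.modify (PySem.Str.lower (pvInfoGet info "proposed_path")) [] (fun fam => fam ++ [info]))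
      PySem.Dict.empty
  -- counts / order pass
  let st :=
    combined.foldl (fun (st : PySem.Dict String Int × List String) info =>
      let k := PySem.Str.lower (pvInfoGet info "proposed_path")
      let counts := st.1.insert k (st.1.getD k 0 + 1)
      if counts.getD k 0 == 2 then (counts, st.2 ++ [k]) else (counts, st.2))
      (PySem.Dict.empty, [])
  -- final dict comprehension (groups[k][0] is always in range: k reached count 2)
  (st.2.foldl (fun (d : PySem.Dict String (List (List (String × String)))) k =>
      d.insert (pvInfoGet ((PySem.List.pyGet? (groups.getD k []) 0).getD []) "filesystem_path")
        (groups.getD k [])) PySem.Dict.empty).items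

-- ===== PRECONDITION & SPEC =====
def Spec_identify_twins (paths : List String) (proposed_changes : List (String × String)) (out : List (String × List (List (String × String)))) : Prop := out = identify_twins_alt paths proposed_changes
instance (paths : List String) (proposed_changes : List (String × String)) (out : List (String × List (List (String × String)))) : Decidable (Spec_identify_twins paths proposed_changes out) := by unfold Spec_identify_twins; infer_instance

-- ===== CLAIM (what is proved, stated in full; the proofs are below) =====
def Claim_equal_identify_twins : Prop := ∀ (paths : List String) (proposed_changes : List (String × String)), Dom_identify_twins paths proposed_changes → Spec_identify_twins paths proposed_changes (identify_twins paths proposed_changes)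

-- ===== LEMMAS AND PROOFS =====

@[simp] theorem pvInfoGet_proposed (p v : String) :
    pvInfoGet (pvMkInfo p v) "proposed_path" = v := rfl

@[simp] theorem pvInfoGet_filesystem (p v : String) :
    pvInfoGet (pvMkInfo p v) "filesystem_path" = p := rfl

-- the common specification: value function, per-path info and key
def pvInfoF (val : String → String) (p : String) : List (String × String) := pvMkInfo p (val p)
def pvKeyF (val : String → String) (p : String) : String := PySem.Str.lower (val p)

-- keys listed in order of their SECOND occurrence, given the already-seen prefix `pre`
def pvTwinAux : List String → List String → List String
  | _, [] => []
  | pre, c :: t => (if pre.count c == 1 then [c] else []) ++ pvTwinAux (pre ++ [c]) t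

def pvFirst (val : String → String) (l : List String) (c : String) : String :=
  (l.find? (fun p => pvKeyF val p == c)).getD ""

def pvSpecItems (val : String → String) (l : List String) : List (String × List (List (String × String))) :=
  (pvTwinAux [] (l.map (pvKeyF val))).map (fun c =>
    (pvFirst val l c, (l.filter (fun p => pvKeyF val p == c)).map (pvInfoF val)))

theorem pvTwinAux_snoc (ks : List String) (pre : List String) (c : String) :
    pvTwinAux pre (ks ++ [c]) =
      pvTwinAux pre ks ++ (if (pre ++ ks).count c == 1 then [c] else []) := by
  induction ks generalizing pre with
  | nil => simp [pvTwinAux]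
  | cons a t ih => simp [pvTwinAux, ih, List.append_assoc]

theorem pvTwinAux_count_ge (ks pre : List String) (c : String)
    (h : c ∈ pvTwinAux pre ks) : 2 ≤ pre.count c + ks.count c := by
  induction ks generalizing pre with
  | nil => simp [pvTwinAux] at h
  | cons a t ih =>
      simp only [pvTwinAux, List.mem_append] at h
      rcases h with h | h
      · split at h
        · rename_i hcnt
          simp only [List.mem_singleton] at h
          subst h
          simp only [beq_iff_eq] at hcnt
          simp [hcnt]
          omega
        · simp at h
      · have := ih (pre ++ [a]) h
        simp only [List.count_append, List.count_cons] at this ⊢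
        by_cases hac : a = c <;> simp [hac] at this ⊢ <;> omega

theorem pvTwinAux_mem_pre_count_le (ks pre : List String) (c : String)
    (h : c ∈ pvTwinAux pre ks) : pre.count c ≤ 1 := by
  induction ks generalizing pre with
  | nil => simp [pvTwinAux] at h
  | cons a t ih =>
      simp only [pvTwinAux, List.mem_append] at h
      rcases h with h | h
      · split at h
        · rename_i hcnt
          simp only [List.mem_singleton] at h
          subst h
          simp only [beq_iff_eq] at hcnt
          omega
        · simp at h
      · have := ih (pre ++ [a]) h
        simp only [List.count_append, List.count_singleton] at this
        by_cases hac : a = c <;> simp [hac] at this <;> omega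

theorem pvTwinAux_nodup (ks pre : List String) : (pvTwinAux pre ks).Nodup := by
  induction ks generalizing pre with
  | nil => simp [pvTwinAux]
  | cons a t ih =>
      simp only [pvTwinAux]
      split
      · rename_i hcnt
        simp only [beq_iff_eq] at hcnt
        refine List.nodup_cons.2 ⟨fun hmem => ?_, ih (pre ++ [a])⟩
        have := pvTwinAux_mem_pre_count_le t (pre ++ [a]) a hmem
        simp [List.count_append, hcnt] at this
      · simpa using ih (pre ++ [a])

-- -- basic facts about pvFirst / counts -------------------------------------

theorem pvFirst_eq (val : String → String) (l : List String) (c q : String)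
    (h : l.find? (fun p => pvKeyF val p == c) = some q) :
    pvFirst val l c = q ∧ pvKeyF val q = c ∧ q ∈ l := by
  refine ⟨by simp [pvFirst, h], ?_, List.mem_of_find?_eq_some h⟩
  have := List.find?_some h
  simpa using this

theorem pvCount_eq (val : String → String) (l : List String) (c : String) :
    (l.map (pvKeyF val)).count c = (l.filter (fun p => pvKeyF val p == c)).length := by
  rw [List.count_eq_countP]
  rw [List.countP_map, List.countP_eq_length_filter]
  congr 1

theorem pvFind_isSome (val : String → String) (l : List String) (c : String)
    (h : 1 ≤ (l.map (pvKeyF val)).count c) :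
    ∃ q, l.find? (fun p => pvKeyF val p == c) = some q := by
  rw [pvCount_eq] at h
  rcases List.exists_mem_of_length_pos (Nat.lt_of_lt_of_le Nat.zero_lt_one h) with ⟨q, hq⟩
  have hp : (pvKeyF val q == c) = true := by simpa using (List.mem_filter.1 hq).2
  have hs : (List.find? (fun p => pvKeyF val p == c) l).isSome = true :=
    List.find?_isSome.2 ⟨q, List.mem_of_mem_filter hq, hp⟩
  rcases Option.isSome_iff_exists.1 hs with ⟨r, hr⟩
  exact ⟨r, hr⟩

theorem pvCount_zero (val : String → String) (l : List String) (c : String)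
    (h : l.find? (fun p => pvKeyF val p == c) = none) :
    (l.map (pvKeyF val)).count c = 0 := by
  rw [pvCount_eq, List.length_eq_zero_iff, List.filter_eq_nil_iff]
  exact fun p hp => by simpa using List.find?_eq_none.1 h p hp

theorem pvTwin_mem_of_count (ks : List String) (pre : List String) (c : String)
    (h1 : pre.count c ≤ 1) (h2 : 2 ≤ pre.count c + ks.count c) :
    c ∈ pvTwinAux pre ks := by
  induction ks generalizing pre with
  | nil => simp at h2; omega
  | cons a t ih =>
      simp only [pvTwinAux, List.mem_append]
      by_cases hac : a = c
      · subst hac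
        by_cases hone : pre.count a = 1
        · exact Or.inl (by simp [hone])
        · refine Or.inr (ih (pre ++ [a]) ?_ ?_)
          · simp [List.count_append]; omega
          · simp only [List.count_append, List.count_cons_self] at h2 ⊢
            simp; omega
      · refine Or.inr (ih (pre ++ [a]) ?_ ?_)
        · simp [List.count_append, hac, h1]
        · simpa [List.count_append, List.count_cons, hac] using h2

theorem pvTwin_mem_iff (ks : List String) (c : String) :
    c ∈ pvTwinAux [] ks ↔ 2 ≤ ks.count c := by
  constructor
  · intro h; simpa using pvTwinAux_count_ge ks [] c h
  · intro h; exact pvTwin_mem_of_count ks [] c (by simp) (by simpa using h)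

-- first path of each twin family has that family's key
theorem pvFirst_mem_twin (val : String → String) (l : List String) (c : String)
    (hc : c ∈ pvTwinAux [] (l.map (pvKeyF val))) :
    ∃ q, l.find? (fun p => pvKeyF val p == c) = some q ∧ pvFirst val l c = q ∧ pvKeyF val q = c ∧ q ∈ l := by
  have h2 := (pvTwin_mem_iff _ c).1 hc
  rcases pvFind_isSome val l c (by omega) with ⟨q, hq⟩
  rcases pvFirst_eq val l c q hq with ⟨h1, h3, h4⟩
  exact ⟨q, hq, h1, h3, h4⟩

theorem pvFirst_nodup (val : String → String) (l : List String) :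
    ((pvTwinAux [] (l.map (pvKeyF val))).map (pvFirst val l)).Nodup := by
  refine List.Nodup.map_on ?_ (pvTwinAux_nodup _ [])
  intro x hx y hy hxy
  rcases pvFirst_mem_twin val l x hx with ⟨qx, _, hx1, hx2, _⟩
  rcases pvFirst_mem_twin val l y hy with ⟨qy, _, hy1, hy2, _⟩
  rw [hx1, hy1] at hxy
  rw [← hx2, ← hy2, hxy]

-- pvSpecItems is unchanged by appending a path whose key is not c
theorem pvFilter_snoc_ne (val : String → String) (l : List String) (p c : String)
    (h : pvKeyF val p ≠ c) :
    (l ++ [p]).filter (fun x => pvKeyF val x == c) = l.filter (fun x => pvKeyF val x == c) := by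
  simp [List.filter_append, h]

theorem pvFirst_snoc (val : String → String) (l : List String) (p c : String) :
    (l ++ [p]).find? (fun x => pvKeyF val x == c)
      = ((l.find? (fun x => pvKeyF val x == c)).or ((if pvKeyF val p == c then some p else none))) := by
  rw [List.find?_append]
  congr 1
  by_cases h : pvKeyF val p = c
  · simp [List.find?, h]
  · have hb : (pvKeyF val p == c) = false := by simpa using h
    simp [List.find?, hb]

theorem pvFind_snoc_eq (val : String → String) (l : List String) (p c : String)
    (hsome : (l.find? (fun x => pvKeyF val x == pvKeyF val p)).isSome) :
    (l ++ [p]).find? (fun x => pvKeyF val x == c) = l.find? (fun x => pvKeyF val x == c) := by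
  rw [pvFirst_snoc]
  by_cases hc : pvKeyF val p = c
  · subst hc
    rcases Option.isSome_iff_exists.1 hsome with ⟨q, hq⟩
    rw [hq]; rfl
  · have : (pvKeyF val p == c) = false := by simpa using hc
    simp [this]

theorem pvFirst_snoc_self (val : String → String) (l : List String) (p q : String)
    (hfind : l.find? (fun x => pvKeyF val x == pvKeyF val p) = some q) :
    pvFirst val (l ++ [p]) (pvKeyF val p) = q := by
  unfold pvFirst
  rw [pvFind_snoc_eq val l p _ (by simp [hfind]), hfind]
  rfl

theorem pvFirst_snoc_ne (val : String → String) (l : List String) (p c : String)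
    (hne : pvKeyF val p ≠ c) :
    pvFirst val (l ++ [p]) c = pvFirst val l c := by
  unfold pvFirst
  rw [pvFirst_snoc]
  have : (pvKeyF val p == c) = false := by simpa using hne
  simp [this]

theorem pvFilter_snoc_self (val : String → String) (l : List String) (p : String) :
    (l ++ [p]).filter (fun x => pvKeyF val x == (pvKeyF val p))
      = l.filter (fun x => pvKeyF val x == (pvKeyF val p)) ++ [p] := by
  simp [List.filter_append]

-- when the key occurs exactly once in l, the filtered list is exactly the found element
theorem pvFilter_eq_singleton (val : String → String) (l : List String) (c q : String)
    (hfind : l.find? (fun x => pvKeyF val x == c) = some q)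
    (hcnt : (l.map (pvKeyF val)).count c = 1) :
    l.filter (fun x => pvKeyF val x == c) = [q] := by
  rw [pvCount_eq] at hcnt
  rcases List.length_eq_one_iff.1 hcnt with ⟨a, ha⟩
  have : (l.filter (fun x => pvKeyF val x == c)).head? = some q := by
    rw [List.head?_filter, hfind]
  rw [ha] at this ⊢
  simpa using this

-- ------------------------------------------------------------------ A side --

def pvStepA (val : String → String)
    (st : PySem.Dict String (List (List (String × String))) × PySem.Dict String (List (String × String)))
    (p : String) :
    PySem.Dict String (List (List (String × String))) × PySem.Dict String (List (String × String)) :=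
  let lower_path := pvKeyF val p
  match st.2.get? lower_path with
  | some existing_path_info =>
      let existing_path := pvInfoGet existing_path_info "filesystem_path"
      if st.1.contains existing_path then
        (st.1.modify existing_path [] (fun fam => fam ++ [pvInfoF val p]), st.2)
      else
        (st.1.insert existing_path [existing_path_info, pvInfoF val p], st.2)
  | none => (st.1, st.2.insert lower_path (pvInfoF val p))

theorem pvA_inv (val : String → String) (l : List String) :
    (l.foldl (pvStepA val) (PySem.Dict.empty, PySem.Dict.empty)).1.items = pvSpecItems val l ∧
    ∀ c, (l.foldl (pvStepA val) (PySem.Dict.empty, PySem.Dict.empty)).2.get? c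
          = (l.find? (fun p => pvKeyF val p == c)).map (pvInfoF val) := by
  induction l using List.reverseRecOn with
  | nil => exact ⟨rfl, fun c => rfl⟩
  | append_singleton l p ih =>
      obtain ⟨ih1, ih2⟩ := ih
      rw [List.foldl_append]
      simp only [List.foldl_cons, List.foldl_nil]
      set st := l.foldl (pvStepA val)
        ((PySem.Dict.empty, PySem.Dict.empty) :
          PySem.Dict String (List (List (String × String))) × PySem.Dict String (List (String × String)))
        with hst
      have hpd := ih2 (pvKeyF val p)
      cases hfind : l.find? (fun x => pvKeyF val x == pvKeyF val p) with
      | none =>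
          have hcnt0 : (l.map (pvKeyF val)).count (pvKeyF val p) = 0 := pvCount_zero val l _ hfind
          have hget : st.2.get? (pvKeyF val p) = none := by rw [hpd, hfind]; rfl
          have hstep : pvStepA val st p = (st.1, st.2.insert (pvKeyF val p) (pvInfoF val p)) := by
            simp only [pvStepA, hget]
          rw [hstep]
          constructor
          · show st.1.items = _
            rw [ih1]
            unfold pvSpecItems
            rw [List.map_append, List.map_cons, List.map_nil, pvTwinAux_snoc]
            have hb : ((l.map (pvKeyF val)).count (pvKeyF val p) == 1) = false := by simp [hcnt0]
            simp only [List.nil_append, hb, Bool.false_eq_true, if_false, List.append_nil]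
            refine List.map_congr_left ?_
            intro c hcm
            have h2 := (pvTwin_mem_iff _ c).1 hcm
            have hne : pvKeyF val p ≠ c := by
              intro h; rw [h] at hcnt0; omega
            rw [pvFilter_snoc_ne val l p c hne, pvFirst_snoc_ne val l p c hne]
          · intro c
            show (st.2.insert (pvKeyF val p) (pvInfoF val p)).get? c = _
            rw [PySem.Dict.get?_insert, pvFirst_snoc]
            by_cases hck : c = pvKeyF val p
            · subst hck
              rw [hfind]
              simp
            · have hb : (pvKeyF val p == c) = false := by
                simpa using fun h => hck h.symm
              simp [hck, ih2 c, hb]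
      | some q =>
          obtain ⟨hfr, hkq, hql⟩ := pvFirst_eq val l (pvKeyF val p) q hfind
          have hget : st.2.get? (pvKeyF val p) = some (pvInfoF val q) := by rw [hpd, hfind]; rfl
          have hsome : (l.find? (fun x => pvKeyF val x == pvKeyF val p)).isSome := by simp [hfind]
          have hcnt1 : 1 ≤ (l.map (pvKeyF val)).count (pvKeyF val p) :=
            List.count_pos_iff.2 (List.mem_map.2 ⟨q, hql, hkq⟩)
          have hkeys : st.1.keys = (pvTwinAux [] (l.map (pvKeyF val))).map (pvFirst val l) := by
            show st.1.items.map _ = _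
            rw [ih1]
            unfold pvSpecItems
            rw [List.map_map]
            rfl
          have hnodup : st.1.keys.Nodup := by
            rw [hkeys]; exact pvFirst_nodup val l
          have hcontains : st.1.contains q
              = decide (pvKeyF val p ∈ pvTwinAux [] (l.map (pvKeyF val))) := by
            rw [PySem.Dict.contains_eq_decide_mem_keys, hkeys]
            simp only [decide_eq_decide]
            constructor
            · intro hqm
              rcases List.mem_map.1 hqm with ⟨c, hcm, hcq⟩
              rcases pvFirst_mem_twin val l c hcm with ⟨qc, _, h1, h2, _⟩
              rw [h1] at hcq
              subst hcq
              rwa [← h2, hkq] at hcm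
            · intro hkm
              exact List.mem_map.2 ⟨pvKeyF val p, hkm, hfr⟩
          by_cases hmem : pvKeyF val p ∈ pvTwinAux [] (l.map (pvKeyF val))
          · -- second or later twin: append to the existing family
            have hcnt2 : 2 ≤ (l.map (pvKeyF val)).count (pvKeyF val p) :=
              (pvTwin_mem_iff _ _).1 hmem
            have hcontq : st.1.contains q = true := by rw [hcontains]; simp [hmem]
            have hgetD : st.1.getD q []
                = (l.filter (fun x => pvKeyF val x == pvKeyF val p)).map (pvInfoF val) := by
              refine PySem.Dict.getD_of_mem_items st.1 ?_ hnodup []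
              rw [ih1]
              unfold pvSpecItems
              refine List.mem_map.2 ⟨pvKeyF val p, hmem, ?_⟩
              rw [hfr]
            have hstep : pvStepA val st p
                = (st.1.insert q ((st.1.getD q []) ++ [pvInfoF val p]), st.2) := by
              simp only [pvStepA, hget]
              have hq1 : pvInfoGet (pvInfoF val q) "filesystem_path" = q := rfl
              rw [hq1] at *
              simp [hcontq, PySem.Dict.modify]
            rw [hstep]
            constructor
            · show (st.1.insert q _).items = _
              rw [PySem.Dict.items_insert_of_contains _ _ hcontq, ih1]
              unfold pvSpecItems
              rw [List.map_append, List.map_cons, List.map_nil, pvTwinAux_snoc]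
              have hb : ((l.map (pvKeyF val)).count (pvKeyF val p) == 1) = false := by
                simp only [beq_eq_false_iff_ne, ne_eq]; omega
              simp only [List.nil_append, hb, Bool.false_eq_true, if_false, List.append_nil]
              rw [List.map_map]
              refine List.map_congr_left ?_
              intro c hcm
              simp only [Function.comp_apply]
              by_cases hck : c = pvKeyF val p
              · subst hck
                have hfq : (pvFirst val l (pvKeyF val p) == q) = true := by simp [hfr]
                simp only [hfq, if_true]
                rw [pvFirst_snoc_self val l p q hfind, pvFilter_snoc_self val l p,
                   List.map_append, hgetD]
                rfl
              · have hne : pvKeyF val p ≠ c := fun h => hck h.symm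
                have hfq : (pvFirst val l c == q) = false := by
                  simp only [beq_eq_false_iff_ne, ne_eq]
                  intro h
                  rcases pvFirst_mem_twin val l c hcm with ⟨qc, _, h1, h2, _⟩
                  rw [h1] at h
                  subst h
                  exact hck (by rw [← h2, hkq])
                simp only [hfq, Bool.false_eq_true, if_false]
                rw [pvFilter_snoc_ne val l p c hne, pvFirst_snoc_ne val l p c hne]
            · intro c
              show st.2.get? c = _
              rw [pvFind_snoc_eq val l p c hsome, ih2 c]
          · -- exactly the second occurrence is yet to come: this is the first twin, new family
            have hcnt_eq1 : (l.map (pvKeyF val)).count (pvKeyF val p) = 1 := by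
              have := (pvTwin_mem_iff (l.map (pvKeyF val)) (pvKeyF val p)).2
              by_contra h
              exact hmem (this (by omega))
            have hcontq : st.1.contains q = false := by rw [hcontains]; simp [hmem]
            have hstep : pvStepA val st p
                = (st.1.insert q [pvInfoF val q, pvInfoF val p], st.2) := by
              simp only [pvStepA, hget]
              have hq1 : pvInfoGet (pvInfoF val q) "filesystem_path" = q := rfl
              rw [hq1] at *
              simp [hcontq]
            rw [hstep]
            constructor
            · show (st.1.insert q _).items = _
              rw [PySem.Dict.items_insert_of_not_contains _ _ hcontq, ih1]
              unfold pvSpecItems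
              rw [List.map_append, List.map_cons, List.map_nil, pvTwinAux_snoc]
              have hb : ((l.map (pvKeyF val)).count (pvKeyF val p) == 1) = true := by
                simp [hcnt_eq1]
              simp only [List.nil_append, hb, if_true, List.map_append, List.map_cons, List.map_nil]
              congr 1
              · refine List.map_congr_left ?_
                intro c hcm
                have hne : pvKeyF val p ≠ c := by
                  intro h; rw [← h] at hcm; exact hmem hcm
                rw [pvFilter_snoc_ne val l p c hne, pvFirst_snoc_ne val l p c hne]
              · rw [pvFirst_snoc_self val l p q hfind, pvFilter_snoc_self val l p,
                   List.map_append, pvFilter_eq_singleton val l _ q hfind hcnt_eq1]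
                rfl
            · intro c
              show st.2.get? c = _
              rw [pvFind_snoc_eq val l p c hsome, ih2 c]

theorem pvA_eq_spec (paths : List String) (proposed_changes : List (String × String)) :
    identify_twins paths proposed_changes
      = pvSpecItems (fun p => ((PySem.Dict.mk proposed_changes).get? p).getD p) paths := by
  set val : String → String := fun p => ((PySem.Dict.mk proposed_changes).get? p).getD p with hval
  unfold identify_twins
  rw [PySem.List.foldl_append_singleton_eq_map]
  simp only [List.nil_append, List.foldl_map]
  show (paths.foldl (pvStepA val) (PySem.Dict.empty, PySem.Dict.empty)).1.items = _
  exact (pvA_inv val paths).1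

-- ------------------------------------------------------------------ B side --

theorem pvB_groups (val : String → String) (l : List String) (c : String) :
    (l.foldl (fun (g : PySem.Dict String (List (List (String × String)))) p =>
        g.modify (pvKeyF val p) [] (fun fam => fam ++ [pvInfoF val p])) PySem.Dict.empty).getD c []
      = (l.filter (fun p => pvKeyF val p == c)).map (pvInfoF val) := by
  have h := PySem.Dict.getD_foldl_modify_append (l.map (fun p => (pvKeyF val p, pvInfoF val p)))
      PySem.Dict.empty c
  rw [List.foldl_map] at h
  simpa [List.filter_map, List.map_map, Function.comp] using h

def pvStepC (val : String → String) (st : PySem.Dict String Int × List String) (p : String) :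
    PySem.Dict String Int × List String :=
  let k := pvKeyF val p
  let counts := st.1.insert k (st.1.getD k 0 + 1)
  if counts.getD k 0 == 2 then (counts, st.2 ++ [k]) else (counts, st.2)

theorem pvB_order (val : String → String) (l : List String) :
    (∀ c, (l.foldl (pvStepC val) (PySem.Dict.empty, [])).1.getD c 0
        = ((l.map (pvKeyF val)).count c : Int)) ∧
    (l.foldl (pvStepC val) (PySem.Dict.empty, [])).2 = pvTwinAux [] (l.map (pvKeyF val)) := by
  induction l using List.reverseRecOn with
  | nil => exact ⟨fun c => by simp [PySem.Dict.getD_empty], by simp [pvTwinAux]⟩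
  | append_singleton l p ih =>
      rcases ih with ⟨ihc, iho⟩
      rw [List.foldl_append]
      simp only [List.foldl_cons, List.foldl_nil]
      set st := l.foldl (pvStepC val) ((PySem.Dict.empty, []) : PySem.Dict String Int × List String) with hst
      have hstep : pvStepC val st p
          = (st.1.insert (pvKeyF val p) (st.1.getD (pvKeyF val p) 0 + 1),
             if (st.1.getD (pvKeyF val p) 0 + 1 == 2) then st.2 ++ [pvKeyF val p] else st.2) := by
        simp only [pvStepC, PySem.Dict.getD_insert_self]
        split <;> simp_all
      rw [hstep]
      constructor
      · intro c
        simp only []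
        rw [PySem.Dict.getD_insert]
        by_cases hck : c = pvKeyF val p
        · subst hck
          simp [ihc, List.count_append]
        · have hne : pvKeyF val p ≠ c := fun h => hck h.symm
          simp [hck, ihc, List.count_append, hne]
      · simp only []
        rw [List.map_append, List.map_cons, List.map_nil, pvTwinAux_snoc, ← iho]
        rw [ihc (pvKeyF val p)]
        by_cases h1 : (l.map (pvKeyF val)).count (pvKeyF val p) = 1
        · simp [h1]
        · have hb1 : ((((l.map (pvKeyF val)).count (pvKeyF val p) : Int) + 1) == 2) = false := by
            simp only [beq_eq_false_iff_ne, ne_eq]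
            intro h; apply h1; omega
          have hb2 : (((l.map (pvKeyF val)).count (pvKeyF val p)) == 1) = false := by
            simpa using h1
          simp [hb1, hb2]

theorem pvB_eq_spec (paths : List String) (proposed_changes : List (String × String)) :
    identify_twins_alt paths proposed_changes
      = pvSpecItems (fun p => ((PySem.Dict.mk proposed_changes).get? p).getD p) paths := by
  set val : String → String := fun p => ((PySem.Dict.mk proposed_changes).get? p).getD p with hval
  obtain ⟨-, ho⟩ := pvB_order val paths
  unfold identify_twins_alt
  simp only [List.nil_append, List.foldl_map]
  show ((paths.foldl (pvStepC val) (PySem.Dict.empty, [])).2.foldl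
      (fun d k => d.insert
        (pvInfoGet ((PySem.List.pyGet? ((paths.foldl
            (fun (g : PySem.Dict String (List (List (String × String)))) p =>
              g.modify (pvKeyF val p) [] (fun fam => fam ++ [pvInfoF val p]))
            PySem.Dict.empty).getD k []) 0).getD []) "filesystem_path")
        ((paths.foldl
            (fun (g : PySem.Dict String (List (List (String × String)))) p =>
              g.modify (pvKeyF val p) [] (fun fam => fam ++ [pvInfoF val p]))
            PySem.Dict.empty).getD k [])) PySem.Dict.empty).items
    = pvSpecItems val paths
  rw [ho]
  set G : PySem.Dict String (List (List (String × String))) := paths.foldl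
      (fun (g : PySem.Dict String (List (List (String × String)))) p =>
        g.modify (pvKeyF val p) [] (fun fam => fam ++ [pvInfoF val p])) PySem.Dict.empty with hG
  set order := pvTwinAux [] (paths.map (pvKeyF val)) with horder
  have hk : ∀ c ∈ order, pvInfoGet ((PySem.List.pyGet? (G.getD c []) 0).getD []) "filesystem_path"
      = pvFirst val paths c := by
    intro c hcm
    rcases pvFirst_mem_twin val paths c hcm with ⟨q, hq, hfr, _, _⟩
    rw [hG, pvB_groups val paths c, PySem.List.pyGet?_zero, ← List.head?_eq_getElem?,
       List.head?_map, List.head?_filter, hq]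
    simp [hfr, pvInfoF]
  have hfresh := PySem.Dict.items_foldl_insert_fresh order
      (fun c => pvInfoGet ((PySem.List.pyGet? (G.getD c []) 0).getD []) "filesystem_path")
      (fun c => G.getD c []) PySem.Dict.empty
      (fun a _ => @PySem.Dict.contains_empty String (List (List (String × String))) _ a)
      (by rw [List.map_congr_left hk]; exact pvFirst_nodup val paths)
  rw [hfresh]
  unfold pvSpecItems
  rw [show PySem.Dict.empty.items = ([] : List (String × List (List (String × String)))) from rfl,
     List.nil_append]
  refine List.map_congr_left ?_
  intro c hcm
  beta_reduce
  rw [hk c hcm, hG, pvB_groups val paths c]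

-- ===== VERDICT (by name: the statement is the Claim_ definition above) =====
theorem identify_twins_spec : Claim_equal_identify_twins := by
  intro paths proposed_changes _
  unfold Spec_identify_twins
  rw [pvA_eq_spec, pvB_eq_spec]
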